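-- pv_equiv track=rewrite | github.com/ntalukde/node2binary | util/get_similar_pairs.py | get_hyponyms
-- ===== SOURCE A (Python) =====
-- def get_hyponyms(pair_numbers):
--     hypernyms = dict()
--     hyponyms = dict()
--     for (A, B) in pair_numbers:
--         # drop equal words if needed
--         if A == B: continue
--         # add B to A's hypernyms
--         if A not in hypernyms:
--             hypernyms[A] = set()
--             hyponyms[A] = set()
--         hypernyms[A].add(B)
--
--         # add A to B's hyponyms
--         if B not in hyponyms:
--             hypernyms[B] = set()
--             hyponyms[B] = set()
--         hyponyms[B].add(A)
--     return hypernyms, hyponyms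
-- ===== SOURCE B (Python) =====
-- def get_hyponyms(pair_numbers):
--     # grouping decomposition: filter edges, list all words once, then build each
--     # adjacency dict by a per-word comprehension over the edges
--     edges = [(A, B) for A, B in pair_numbers if A != B]
--     words = list(dict.fromkeys(w for e in edges for w in e))
--     hypernyms = {w: {B for A, B in edges if A == w} for w in words}
--     hyponyms = {w: {A for A, B in edges if B == w} for w in words}
--     return hypernyms, hyponyms
-- ===== Notes on version B (the rewrite author's own statement) =====
-- stated objective: alternative
-- what changed: Instead of incrementally growing both dicts in one stateful pass with membership checks and in-place set mutation, B filters the self-loop-free edges, lists every word once (dedup in first-appearance order), and then builds each adjacency dict by a per-word grouping comprehension over the edge list.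
import Mathlib
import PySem

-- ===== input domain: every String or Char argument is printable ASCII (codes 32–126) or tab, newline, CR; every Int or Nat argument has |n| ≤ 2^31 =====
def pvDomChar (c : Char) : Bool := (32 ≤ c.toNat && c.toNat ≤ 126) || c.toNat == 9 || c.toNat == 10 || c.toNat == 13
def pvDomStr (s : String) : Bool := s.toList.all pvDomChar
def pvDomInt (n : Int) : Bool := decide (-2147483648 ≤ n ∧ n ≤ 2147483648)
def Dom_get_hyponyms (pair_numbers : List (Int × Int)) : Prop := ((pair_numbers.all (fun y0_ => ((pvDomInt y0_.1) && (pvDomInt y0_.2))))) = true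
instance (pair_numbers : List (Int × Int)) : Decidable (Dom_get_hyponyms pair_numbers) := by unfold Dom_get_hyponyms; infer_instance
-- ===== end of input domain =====

-- B replaces A's single stateful pass (two dicts grown with membership checks and
-- in-place set mutation) by a grouping decomposition: edge filter, word list, then
-- one per-word comprehension per dict; same return value, no speed claim.

-- ===== PORT A =====
-- loop body of A's 'for (A, B) in pair_numbers'
def pvStepA (st : PySem.Dict Int (PySem.Set Int) × PySem.Dict Int (PySem.Set Int)) (p : Int × Int) :
    PySem.Dict Int (PySem.Set Int) × PySem.Dict Int (PySem.Set Int) :=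
  if p.1 == p.2 then st
  else
    -- if A not in hypernyms: hypernyms[A] = set(); hyponyms[A] = set()
    let st1 := if st.1.contains p.1 then st
               else (st.1.insert p.1 PySem.Set.empty, st.2.insert p.1 PySem.Set.empty)
    -- hypernyms[A].add(B)
    let st2 := (st1.1.modify p.1 PySem.Set.empty (fun s => PySem.Set.add s p.2), st1.2)
    -- if B not in hyponyms: hypernyms[B] = set(); hyponyms[B] = set()
    let st3 := if st2.2.contains p.2 then st2
               else (st2.1.insert p.2 PySem.Set.empty, st2.2.insert p.2 PySem.Set.empty)
    -- hyponyms[B].add(A)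
    (st3.1, st3.2.modify p.2 PySem.Set.empty (fun s => PySem.Set.add s p.1))

def get_hyponyms (pair_numbers : List (Int × Int)) : (List (Int × List Int)) × (List (Int × List Int)) :=
  let st := pair_numbers.foldl pvStepA (PySem.Dict.empty, PySem.Dict.empty)
  (st.1.items, st.2.items)

-- ===== PORT B =====
def get_hyponyms_alt (pair_numbers : List (Int × Int)) : (List (Int × List Int)) × (List (Int × List Int)) :=
  let edges := pair_numbers.filter (fun p => !(p.1 == p.2))
  let words := PySem.List.dedup (edges.flatMap (fun p => [p.1, p.2]))
  let hypernyms := words.map (fun w => (w, PySem.Set.ofList ((edges.filter (fun p => p.1 == w)).map (fun p => p.2))))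
  let hyponyms := words.map (fun w => (w, PySem.Set.ofList ((edges.filter (fun p => p.2 == w)).map (fun p => p.1))))
  (hypernyms, hyponyms)

-- ===== PRECONDITION & SPEC =====
def Spec_get_hyponyms (pair_numbers : List (Int × Int)) (out : (List (Int × List Int)) × (List (Int × List Int))) : Prop := out = get_hyponyms_alt pair_numbers
instance (pair_numbers : List (Int × Int)) (out : (List (Int × List Int)) × (List (Int × List Int))) : Decidable (Spec_get_hyponyms pair_numbers out) := by unfold Spec_get_hyponyms; infer_instance

-- ===== CLAIM (what is proved, stated in full; the proofs are below) =====
def Claim_equal_get_hyponyms : Prop := ∀ (pair_numbers : List (Int × Int)), Dom_get_hyponyms pair_numbers → Spec_get_hyponyms pair_numbers (get_hyponyms pair_numbers)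

-- ===== LEMMAS AND PROOFS =====
-- proof-side abbreviations for the pieces of B
def pvEdges (l : List (Int × Int)) : List (Int × Int) := l.filter (fun p => !(p.1 == p.2))
def pvWords (l : List (Int × Int)) : List Int := PySem.List.dedup ((pvEdges l).flatMap (fun p => [p.1, p.2]))
def pvOuts (l : List (Int × Int)) (w : Int) : List Int := ((pvEdges l).filter (fun p => p.1 == w)).map (fun p => p.2)
def pvIns (l : List (Int × Int)) (w : Int) : List Int := ((pvEdges l).filter (fun p => p.2 == w)).map (fun p => p.1)

lemma pvEdges_append (l : List (Int × Int)) (p : Int × Int) (h : p.1 ≠ p.2) :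
    pvEdges (l ++ [p]) = pvEdges l ++ [p] := by
  simp [pvEdges, List.filter_append, h]

lemma pvWords_append (l : List (Int × Int)) (p : Int × Int) (h : p.1 ≠ p.2) :
    pvWords (l ++ [p]) = PySem.Set.add (PySem.Set.add (pvWords l) p.1) p.2 := by
  simp only [pvWords, pvEdges_append l p h, List.flatMap_append]
  simp [PySem.Set.ofList_append, PySem.Set.update_cons, PySem.Set.update_nil]

lemma pvOuts_append (l : List (Int × Int)) (p : Int × Int) (h : p.1 ≠ p.2) (w : Int) :
    pvOuts (l ++ [p]) w = pvOuts l w ++ (if p.1 = w then [p.2] else []) := by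
  by_cases hw : p.1 = w <;> simp [pvOuts, pvEdges_append l p h, List.filter_append, hw]

lemma pvIns_append (l : List (Int × Int)) (p : Int × Int) (h : p.1 ≠ p.2) (w : Int) :
    pvIns (l ++ [p]) w = pvIns l w ++ (if p.2 = w then [p.1] else []) := by
  by_cases hw : p.2 = w <;> simp [pvIns, pvEdges_append l p h, List.filter_append, hw]

lemma pvOuts_of_not_mem (l : List (Int × Int)) (w : Int) (h : w ∉ pvWords l) : pvOuts l w = [] := by
  rw [pvOuts, List.map_eq_nil_iff, List.filter_eq_nil_iff]
  intro p hp hbe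
  exact h (by
    rw [pvWords, PySem.List.mem_dedup]
    exact List.mem_flatMap.mpr ⟨p, hp, by simp at hbe; simp [hbe]⟩)

lemma pvIns_of_not_mem (l : List (Int × Int)) (w : Int) (h : w ∉ pvWords l) : pvIns l w = [] := by
  rw [pvIns, List.map_eq_nil_iff, List.filter_eq_nil_iff]
  intro p hp hbe
  exact h (by
    rw [pvWords, PySem.List.mem_dedup]
    exact List.mem_flatMap.mpr ⟨p, hp, by simp at hbe; simp [hbe]⟩)

lemma pv_invA (l : List (Int × Int)) :
    (l.foldl pvStepA (PySem.Dict.empty, PySem.Dict.empty)).1.keys = pvWords l ∧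
    (l.foldl pvStepA (PySem.Dict.empty, PySem.Dict.empty)).2.keys = pvWords l ∧
    (∀ w : Int, (l.foldl pvStepA (PySem.Dict.empty, PySem.Dict.empty)).1.getD w PySem.Set.empty = PySem.Set.ofList (pvOuts l w)) ∧
    (∀ w : Int, (l.foldl pvStepA (PySem.Dict.empty, PySem.Dict.empty)).2.getD w PySem.Set.empty = PySem.Set.ofList (pvIns l w)) := by
  induction l using List.reverseRecOn with
  | nil =>
    refine ⟨?_, ?_, ?_, ?_⟩ <;>
      simp [pvWords, pvOuts, pvIns, pvEdges, PySem.Dict.keys_empty, PySem.Dict.getD_empty,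
        PySem.List.dedup, PySem.Set.ofList_nil, PySem.Set.empty]
  | append_singleton l p ih =>
    obtain ⟨hk1, hk2, hg1, hg2⟩ := ih
    simp only [List.foldl_append, List.foldl_cons, List.foldl_nil]
    by_cases hab : p.1 = p.2
    · have he : pvEdges (l ++ [p]) = pvEdges l := by simp [pvEdges, List.filter_append, hab]
      refine ⟨?_, ?_, ?_, ?_⟩
      · simpa [pvStepA, hab, pvWords, he] using hk1
      · simpa [pvStepA, hab, pvWords, he] using hk2
      · intro w; simpa [pvStepA, hab, pvOuts, he] using hg1 w
      · intro w; simpa [pvStepA, hab, pvIns, he] using hg2 w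
    · set st := l.foldl pvStepA ((PySem.Dict.empty : PySem.Dict Int (PySem.Set Int)),
        (PySem.Dict.empty : PySem.Dict Int (PySem.Set Int))) with hst
      have hwords := pvWords_append l p hab
      have hout : ∀ w, PySem.Set.ofList (pvOuts (l ++ [p]) w) =
          if p.1 = w then (PySem.Set.ofList (pvOuts l w)).add p.2 else PySem.Set.ofList (pvOuts l w) := by
        intro w
        rw [pvOuts_append l p hab w]
        by_cases hw : p.1 = w <;> simp [hw, PySem.Set.ofList_append_singleton]
      have hin : ∀ w, PySem.Set.ofList (pvIns (l ++ [p]) w) =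
          if p.2 = w then (PySem.Set.ofList (pvIns l w)).add p.1 else PySem.Set.ofList (pvIns l w) := by
        intro w
        rw [pvIns_append l p hab w]
        by_cases hw : p.2 = w <;> simp [hw, PySem.Set.ofList_append_singleton]
      by_cases hA : p.1 ∈ pvWords l
      · have hcA : st.1.contains p.1 = true := by
          rw [PySem.Dict.contains_eq_decide_mem_keys, hk1]; exact decide_eq_true hA
        by_cases hB : p.2 ∈ pvWords l
        · -- both words already present
          have hcB : st.2.contains p.2 = true := by
            rw [PySem.Dict.contains_eq_decide_mem_keys, hk2]; exact decide_eq_true hB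
          simp only [pvStepA, beq_iff_eq, hab, if_false, hcA, if_true, hcB]
          refine ⟨?_, ?_, ?_, ?_⟩
          · rw [PySem.Dict.keys_modify, PySem.Dict.keys_insert_of_contains _ _ hcA, hk1, hwords,
              PySem.Set.add_of_mem hA, PySem.Set.add_of_mem hB]
          · rw [PySem.Dict.keys_modify, PySem.Dict.keys_insert_of_contains _ _ hcB, hk2, hwords,
              PySem.Set.add_of_mem hA, PySem.Set.add_of_mem hB]
          · intro w
            rw [hout w, PySem.Dict.getD_modify]
            by_cases hw : w = p.1
            · subst hw
              rw [if_pos rfl, if_pos rfl, hg1]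
            · rw [if_neg hw, if_neg (fun h => hw h.symm), hg1 w]
          · intro w
            rw [hin w, PySem.Dict.getD_modify]
            by_cases hw : w = p.2
            · subst hw
              rw [if_pos rfl, if_pos rfl, hg2]
            · rw [if_neg hw, if_neg (fun h => hw h.symm), hg2 w]
        · -- p.1 present, p.2 new
          have hcB : st.2.contains p.2 = false := by
            rw [PySem.Dict.contains_eq_decide_mem_keys, hk2]; exact decide_eq_false hB
          simp only [pvStepA, beq_iff_eq, hab, if_false, hcA, if_true, hcB, Bool.false_eq_true]
          have hcB1 : (st.1.modify p.1 PySem.Set.empty (fun s => PySem.Set.add s p.2)).contains p.2 = false := by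
            rw [PySem.Dict.contains_modify]
            simp [Ne.symm hab, PySem.Dict.contains_eq_decide_mem_keys, hk1, hB]
          refine ⟨?_, ?_, ?_, ?_⟩
          · rw [PySem.Dict.keys_insert_of_not_contains _ _ hcB1, PySem.Dict.keys_modify,
              PySem.Dict.keys_insert_of_contains _ _ hcA, hk1, hwords,
              PySem.Set.add_of_mem hA, PySem.Set.add_of_not_mem hB]
          · rw [PySem.Dict.keys_modify, PySem.Dict.keys_insert_of_contains _ _ (PySem.Dict.contains_insert_self _ _ _),
              PySem.Dict.keys_insert_of_not_contains _ _ hcB, hk2, hwords,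
              PySem.Set.add_of_mem hA, PySem.Set.add_of_not_mem hB]
          · intro w
            rw [hout w, PySem.Dict.getD_insert]
            by_cases hw2 : w = p.2
            · subst hw2
              rw [if_pos rfl, if_neg hab, pvOuts_of_not_mem l p.2 hB, PySem.Set.ofList_nil]; rfl
            · rw [if_neg hw2, PySem.Dict.getD_modify]
              by_cases hw1 : w = p.1
              · subst hw1
                rw [if_pos rfl, if_pos rfl, hg1]
              · rw [if_neg hw1, if_neg (fun h => hw1 h.symm), hg1 w]
          · intro w
            rw [hin w, PySem.Dict.getD_modify]
            by_cases hw2 : w = p.2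
            · subst hw2
              rw [if_pos rfl, if_pos rfl, PySem.Dict.getD_insert, if_pos rfl,
                pvIns_of_not_mem l p.2 hB, PySem.Set.ofList_nil]; rfl
            · rw [if_neg hw2, PySem.Dict.getD_insert, if_neg hw2, if_neg (fun h => hw2 h.symm), hg2 w]
      · have hcA : st.1.contains p.1 = false := by
          rw [PySem.Dict.contains_eq_decide_mem_keys, hk1]; exact decide_eq_false hA
        have hcA2 : st.2.contains p.1 = false := by
          rw [PySem.Dict.contains_eq_decide_mem_keys, hk2]; exact decide_eq_false hA
        by_cases hB : p.2 ∈ pvWords l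
        · -- p.1 new, p.2 present
          have hcB : (st.2.insert p.1 PySem.Set.empty).contains p.2 = true := by
            rw [PySem.Dict.contains_insert]
            simp [PySem.Dict.contains_eq_decide_mem_keys, hk2, hB]
          simp only [pvStepA, beq_iff_eq, hab, if_false, hcA, Bool.false_eq_true, hcB, if_true]
          refine ⟨?_, ?_, ?_, ?_⟩
          · rw [PySem.Dict.keys_modify, PySem.Dict.keys_insert_of_contains _ _ (PySem.Dict.contains_insert_self _ _ _),
              PySem.Dict.keys_insert_of_not_contains _ _ hcA, hk1, hwords,
              PySem.Set.add_of_not_mem hA, PySem.Set.add_of_mem (List.mem_append_left _ hB)]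
          · rw [PySem.Dict.keys_modify, PySem.Dict.keys_insert_of_contains _ _ hcB,
              PySem.Dict.keys_insert_of_not_contains _ _ hcA2, hk2, hwords,
              PySem.Set.add_of_not_mem hA, PySem.Set.add_of_mem (List.mem_append_left _ hB)]
          · intro w
            rw [hout w, PySem.Dict.getD_modify]
            by_cases hw1 : w = p.1
            · subst hw1
              rw [if_pos rfl, if_pos rfl, PySem.Dict.getD_insert, if_pos rfl,
                pvOuts_of_not_mem l p.1 hA, PySem.Set.ofList_nil]; rfl
            · rw [if_neg hw1, PySem.Dict.getD_insert, if_neg hw1, if_neg (fun h => hw1 h.symm), hg1 w]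
          · intro w
            rw [hin w, PySem.Dict.getD_modify]
            by_cases hw2 : w = p.2
            · subst hw2
              rw [if_pos rfl, if_pos rfl, PySem.Dict.getD_insert, if_neg (Ne.symm hab), hg2]
            · rw [if_neg hw2, PySem.Dict.getD_insert]
              by_cases hw1 : w = p.1
              · subst hw1
                rw [if_pos rfl, if_neg (fun h => hw2 h.symm), pvIns_of_not_mem l p.1 hA, PySem.Set.ofList_nil]; rfl
              · rw [if_neg hw1, if_neg (fun h => hw2 h.symm), hg2 w]
        · -- both new
          have hcB : (st.2.insert p.1 PySem.Set.empty).contains p.2 = false := by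
            rw [PySem.Dict.contains_insert]
            simp [Ne.symm hab, PySem.Dict.contains_eq_decide_mem_keys, hk2, hB]
          simp only [pvStepA, beq_iff_eq, hab, if_false, hcA, Bool.false_eq_true, hcB]
          have hcB1 : ((st.1.insert p.1 PySem.Set.empty).modify p.1 PySem.Set.empty (fun s => PySem.Set.add s p.2)).contains p.2 = false := by
            rw [PySem.Dict.contains_modify, PySem.Dict.contains_insert]
            simp [Ne.symm hab, PySem.Dict.contains_eq_decide_mem_keys, hk1, hB]
          have hBapp : p.2 ∉ pvWords l ++ [p.1] := by
            simp [hB, Ne.symm hab]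
          refine ⟨?_, ?_, ?_, ?_⟩
          · rw [PySem.Dict.keys_insert_of_not_contains _ _ hcB1, PySem.Dict.keys_modify,
              PySem.Dict.keys_insert_of_contains _ _ (PySem.Dict.contains_insert_self _ _ _),
              PySem.Dict.keys_insert_of_not_contains _ _ hcA, hk1, hwords,
              PySem.Set.add_of_not_mem hA, PySem.Set.add_of_not_mem hBapp]
          · rw [PySem.Dict.keys_modify, PySem.Dict.keys_insert_of_contains _ _ (PySem.Dict.contains_insert_self _ _ _),
              PySem.Dict.keys_insert_of_not_contains _ _ hcB,
              PySem.Dict.keys_insert_of_not_contains _ _ hcA2, hk2, hwords,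
              PySem.Set.add_of_not_mem hA, PySem.Set.add_of_not_mem hBapp]
          · intro w
            rw [hout w, PySem.Dict.getD_insert]
            by_cases hw2 : w = p.2
            · subst hw2
              rw [if_pos rfl, if_neg hab, pvOuts_of_not_mem l p.2 hB, PySem.Set.ofList_nil]; rfl
            · rw [if_neg hw2, PySem.Dict.getD_modify]
              by_cases hw1 : w = p.1
              · subst hw1
                rw [if_pos rfl, if_pos rfl, PySem.Dict.getD_insert, if_pos rfl,
                  pvOuts_of_not_mem l p.1 hA, PySem.Set.ofList_nil]; rfl
              · rw [if_neg hw1, PySem.Dict.getD_insert, if_neg hw1, if_neg (fun h => hw1 h.symm), hg1 w]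
          · intro w
            rw [hin w, PySem.Dict.getD_modify]
            by_cases hw2 : w = p.2
            · subst hw2
              rw [if_pos rfl, if_pos rfl, PySem.Dict.getD_insert, if_pos rfl,
                pvIns_of_not_mem l p.2 hB, PySem.Set.ofList_nil]; rfl
            · rw [if_neg hw2, PySem.Dict.getD_insert, if_neg hw2, PySem.Dict.getD_insert]
              by_cases hw1 : w = p.1
              · subst hw1
                rw [if_pos rfl, if_neg (fun h => hw2 h.symm), pvIns_of_not_mem l p.1 hA, PySem.Set.ofList_nil]; rfl
              · rw [if_neg hw1, if_neg (fun h => hw2 h.symm), hg2 w]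

lemma pv_main (l : List (Int × Int)) : get_hyponyms l = get_hyponyms_alt l := by
  obtain ⟨hk1, hk2, hg1, hg2⟩ := pv_invA l
  have hnd : (pvWords l).Nodup := PySem.List.nodup_dedup _
  have h1 : (l.foldl pvStepA (PySem.Dict.empty, PySem.Dict.empty)).1.items
      = (pvWords l).map (fun w => (w, PySem.Set.ofList (pvOuts l w))) := by
    rw [PySem.Dict.items_eq_map_keys _ (by rw [hk1]; exact hnd) PySem.Set.empty, hk1]
    exact List.map_congr_left (fun k _ => by simp only [hg1])
  have h2 : (l.foldl pvStepA (PySem.Dict.empty, PySem.Dict.empty)).2.items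
      = (pvWords l).map (fun w => (w, PySem.Set.ofList (pvIns l w))) := by
    rw [PySem.Dict.items_eq_map_keys _ (by rw [hk2]; exact hnd) PySem.Set.empty, hk2]
    exact List.map_congr_left (fun k _ => by simp only [hg2])
  show ((l.foldl pvStepA (PySem.Dict.empty, PySem.Dict.empty)).1.items,
        (l.foldl pvStepA (PySem.Dict.empty, PySem.Dict.empty)).2.items)
      = ((pvWords l).map (fun w => (w, PySem.Set.ofList (pvOuts l w))),
         (pvWords l).map (fun w => (w, PySem.Set.ofList (pvIns l w))))
  rw [h1, h2]

-- ===== VERDICT (by name: the statement is the Claim_ definition above) =====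
theorem get_hyponyms_spec : Claim_equal_get_hyponyms := by
  intro pair_numbers _
  unfold Spec_get_hyponyms
  exact pv_main pair_numbers
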